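-- pv_equiv track=rewrite | github.com/cmudig/tempo-ql | tempo_ql/ai_assistant.py | _is_query_generation_request
-- ===== SOURCE A (Python) =====
-- def _is_query_generation_request(question: str) -> bool:
--     """
--     Determine if the user is asking for query generation related to data analysis.
--
--     Args:
--         question: The user's question
--
--     Returns:
--         True if the question is asking for TempoQL query generation
--     """
--     question_lower = question.lower()
--
--     # Keywords that indicate data analysis/query generation requests
--     generation_keywords = [
--         # Direct query requests
--         'query', 'find', 'get', 'show', 'analyze', 'analysis', 'calculate', 'count',
--         'measure', 'extract', 'retrieve', 'select', 'filter', 'search',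
--
--         # Temporal analysis keywords
--         'time', 'temporal', 'before', 'after', 'during', 'between', 'every',
--         'daily', 'weekly', 'monthly', 'hourly', 'interval', 'period',
--
--         # Medical/data analysis terms
--         'patient', 'diagnosis', 'medication', 'treatment', 'procedure', 'measurement',
--         'vital', 'lab', 'test', 'observation', 'condition', 'drug', 'device',
--         'encounter', 'visit', 'admission', 'discharge',
--
--         # Analysis operations
--         'average', 'mean', 'median', 'sum', 'total', 'maximum', 'minimum',
--         'first', 'last', 'latest', 'earliest', 'recent', 'trend', 'pattern',
--         'frequency', 'rate', 'duration', 'length', 'timeline',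
--
--         # Data exploration
--         'what', 'when', 'how many', 'how often', 'which', 'where'
--     ]
--
--     # Check if any generation keywords are present
--     for keyword in generation_keywords:
--         if keyword in question_lower:
--             return True
--
--     # Check for question patterns that suggest data analysis
--     question_patterns = [
--         'can you', 'could you', 'please', 'i want', 'i need', 'help me',
--         'create', 'generate', 'build', 'make', 'write'
--     ]
--
--     for pattern in question_patterns:
--         if pattern in question_lower:
--             return True
--
--     return False
-- ===== SOURCE B (Python) =====
-- import re
--
-- _TOKENS = (
--     "query|find|get|show|analyze|analysis|calculate|count|"
--     "measure|extract|retrieve|select|filter|search|"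
--     "time|temporal|before|after|during|between|every|"
--     "daily|weekly|monthly|hourly|interval|period|"
--     "patient|diagnosis|medication|treatment|procedure|measurement|"
--     "vital|lab|test|observation|condition|drug|device|"
--     "encounter|visit|admission|discharge|"
--     "average|mean|median|sum|total|maximum|minimum|"
--     "first|last|latest|earliest|recent|trend|pattern|"
--     "frequency|rate|duration|length|timeline|"
--     "what|when|how many|how often|which|where|"
--     "can you|could you|please|i want|i need|help me|"
--     "create|generate|build|make|write"
-- ).split('|')
--
-- # One alternation of escaped literal tokens, compiled once: re.search scans the
-- # string left to right, trying each alternative at each position.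
-- _PATTERN = re.compile('|'.join(re.escape(t) for t in _TOKENS))
--
--
-- def _is_query_generation_request(question: str) -> bool:
--     return _PATTERN.search(question.lower()) is not None
-- ===== Notes on version B (the rewrite author's own statement) =====
-- stated objective: alternative
-- what changed: The two explicit per-keyword substring-scan loops are replaced by one flat token table (split from a packed '|'-separated string) compiled once into a single escaped regex alternation, so the function body is one left-to-right search pass over the lowercased question instead of 86 separate scans.
import Mathlib
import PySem

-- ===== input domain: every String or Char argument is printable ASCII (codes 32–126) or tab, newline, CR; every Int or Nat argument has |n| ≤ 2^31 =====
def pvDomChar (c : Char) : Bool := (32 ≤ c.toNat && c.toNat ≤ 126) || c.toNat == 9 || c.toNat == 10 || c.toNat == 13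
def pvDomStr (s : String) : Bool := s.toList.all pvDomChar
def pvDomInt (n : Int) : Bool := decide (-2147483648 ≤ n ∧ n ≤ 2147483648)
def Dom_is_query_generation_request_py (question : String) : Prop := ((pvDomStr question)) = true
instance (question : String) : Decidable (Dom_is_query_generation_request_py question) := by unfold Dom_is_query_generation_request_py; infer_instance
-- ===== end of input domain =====

-- B replaces A's two per-keyword substring-scan loops by one token table split from a packed string and a single compiled-regex alternation pass (ported as a positional prefix scan); alternative algorithm, same return value.


-- ===== PORT A =====
def pvGenerationKeywords : List String :=
  ["query", "find", "get", "show", "analyze", "analysis", "calculate", "count",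
   "measure", "extract", "retrieve", "select", "filter", "search",
   "time", "temporal", "before", "after", "during", "between", "every",
   "daily", "weekly", "monthly", "hourly", "interval", "period",
   "patient", "diagnosis", "medication", "treatment", "procedure", "measurement",
   "vital", "lab", "test", "observation", "condition", "drug", "device",
   "encounter", "visit", "admission", "discharge",
   "average", "mean", "median", "sum", "total", "maximum", "minimum",
   "first", "last", "latest", "earliest", "recent", "trend", "pattern",
   "frequency", "rate", "duration", "length", "timeline",
   "what", "when", "how many", "how often", "which", "where"]

def pvQuestionPatterns : List String :=
  ["can you", "could you", "please", "i want", "i need", "help me",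
   "create", "generate", "build", "make", "write"]

-- "for keyword in kws: if keyword in question_lower: return True" — early-return loop
def pvScanLoop (kws : List String) (q : String) : Bool :=
  match kws with
  | [] => false
  | k :: rest => if PySem.Str.isIn k q then true else pvScanLoop rest q

def is_query_generation_request_py (question : String) : Bool :=
  let question_lower := PySem.Str.lower question
  if pvScanLoop pvGenerationKeywords question_lower then true
  else if pvScanLoop pvQuestionPatterns question_lower then true
  else false

-- ===== PORT B =====
-- Source B's token table: one packed '|'-separated string, split once.
def pvTokenBlob : String :=
  "query|find|get|show|analyze|analysis|calculate|count|measure|extract|retrieve|select|filter|search|time|temporal|before|after|during|between|every|daily|weekly|monthly|hourly|interval|period|patient|diagnosis|medication|treatment|procedure|measurement|vital|lab|test|observation|condition|drug|device|encounter|visit|admission|discharge|average|mean|median|sum|total|maximum|minimum|first|last|latest|earliest|recent|trend|pattern|frequency|rate|duration|length|timeline|what|when|how many|how often|which|where|can you|could you|please|i want|i need|help me|create|generate|build|make|write"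

-- Source B's ".split('|')" (nonempty literal separator): PySem split?, which is some list here.
def pvTokens : List String := (PySem.Str.split? pvTokenBlob "|").getD []

-- Source B's re.search of the compiled literal alternation, ported by its operational
-- semantics: scan positions left to right, at each one try every alternative as a prefix.
def pvScanPositions (tokens : List String) : List Char → Bool
  | [] => false
  | c :: rest =>
      if tokens.any (fun t => PySem.Chars.startswith (c :: rest) t.toList) then true
      else pvScanPositions tokens rest

def is_query_generation_request_py_alt (question : String) : Bool :=
  pvScanPositions pvTokens (PySem.Str.lower question).toList

-- ===== PRECONDITION & SPEC =====
def Spec_is_query_generation_request_py (question : String) (out : Bool) : Prop := out = is_query_generation_request_py_alt question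
instance (question : String) (out : Bool) : Decidable (Spec_is_query_generation_request_py question out) := by unfold Spec_is_query_generation_request_py; infer_instance

-- ===== CLAIM =====
def Claim_equal_is_query_generation_request_py : Prop := ∀ (question : String), Dom_is_query_generation_request_py question → Spec_is_query_generation_request_py question (is_query_generation_request_py question)

-- ===== LEMMAS AND PROOFS =====
theorem pvScanLoop_iff (kws : List String) (q : String) :
    pvScanLoop kws q = true ↔ ∃ t ∈ kws, t.toList <:+: q.toList := by
  induction kws with
  | nil => simp [pvScanLoop]
  | cons k rest ih =>
    simp only [pvScanLoop]
    cases hk : PySem.Str.isIn k q with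
    | true =>
      have hinf := (PySem.Str.isIn_iff_infix k q).mp hk
      exact iff_of_true rfl ⟨k, List.mem_cons_self, hinf⟩
    | false =>
      simp only [Bool.false_eq_true, if_false, ih]
      constructor
      · rintro ⟨t, ht, h⟩; exact ⟨t, List.mem_cons_of_mem _ ht, h⟩
      · rintro ⟨t, ht, h⟩
        rcases List.mem_cons.mp ht with rfl | ht'
        · rw [(PySem.Str.isIn_iff_infix t q).mpr h] at hk
          exact Bool.noConfusion hk
        · exact ⟨t, ht', h⟩

theorem pvScanPositions_iff (tokens : List String) (cs : List Char)
    (hne : ∀ t ∈ tokens, t.toList ≠ []) :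
    pvScanPositions tokens cs = true ↔ ∃ t ∈ tokens, t.toList <:+: cs := by
  induction cs with
  | nil =>
    refine iff_of_false (by simp [pvScanPositions]) ?_
    rintro ⟨t, ht, hinf⟩
    exact hne t ht (List.infix_nil.mp hinf)
  | cons c rest ih =>
    simp only [pvScanPositions]
    cases h : tokens.any (fun t => PySem.Chars.startswith (c :: rest) t.toList) with
    | true =>
      rcases List.any_eq_true.mp h with ⟨t, ht, hp⟩
      exact iff_of_true rfl ⟨t, ht, ((PySem.Chars.startswith_iff _ _).mp hp).isInfix⟩
    | false =>
      simp only [Bool.false_eq_true, if_false, ih]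
      constructor
      · rintro ⟨t, ht, hinf⟩; exact ⟨t, ht, List.infix_cons_iff.mpr (Or.inr hinf)⟩
      · rintro ⟨t, ht, hinf⟩
        rcases List.infix_cons_iff.mp hinf with hpre | hinf'
        · have hx : (tokens.any fun t' => PySem.Chars.startswith (c :: rest) t'.toList) = true :=
            List.any_eq_true.mpr ⟨t, ht, (PySem.Chars.startswith_iff _ _).mpr hpre⟩
          rw [hx] at h
          exact Bool.noConfusion h
        · exact ⟨t, ht, hinf'⟩

set_option maxRecDepth 40000 in
set_option maxHeartbeats 4000000 in
theorem pvTokens_eq : pvTokens = pvGenerationKeywords ++ pvQuestionPatterns := by decide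

set_option maxRecDepth 20000 in
theorem pvTokens_ne_nil : ∀ t ∈ pvTokens, t.toList ≠ [] := by
  rw [pvTokens_eq]; decide

theorem pvTokens_mem (t : String) :
    t ∈ pvTokens ↔ t ∈ pvGenerationKeywords ∨ t ∈ pvQuestionPatterns := by
  rw [pvTokens_eq, List.mem_append]

-- ===== VERDICT =====
theorem is_query_generation_request_py_spec : Claim_equal_is_query_generation_request_py := by
  intro question _
  unfold Spec_is_query_generation_request_py is_query_generation_request_py
    is_query_generation_request_py_alt
  set q := PySem.Str.lower question with hq
  have hB := pvScanPositions_iff pvTokens q.toList pvTokens_ne_nil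
  have h1 := pvScanLoop_iff pvGenerationKeywords q
  have h2 := pvScanLoop_iff pvQuestionPatterns q
  cases hb : pvScanPositions pvTokens q.toList with
  | true =>
    rcases hB.mp hb with ⟨t, ht, hinf⟩
    rcases (pvTokens_mem t).mp ht with ht' | ht'
    · simp [h1.mpr ⟨t, ht', hinf⟩]
    · cases hg : pvScanLoop pvGenerationKeywords q <;>
        simp [hg, h2.mpr ⟨t, ht', hinf⟩]
  | false =>
    have hno : ¬ ∃ t ∈ pvTokens, t.toList <:+: q.toList := by
      intro hx; rw [← hB] at hx; simp [hx] at hb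
    have hg : pvScanLoop pvGenerationKeywords q = false := by
      cases hgv : pvScanLoop pvGenerationKeywords q
      · rfl
      · rcases h1.mp hgv with ⟨t, ht, hinf⟩
        exact absurd ⟨t, (pvTokens_mem t).mpr (Or.inl ht), hinf⟩ hno
    have hp : pvScanLoop pvQuestionPatterns q = false := by
      cases hpv : pvScanLoop pvQuestionPatterns q
      · rfl
      · rcases h2.mp hpv with ⟨t, ht, hinf⟩
        exact absurd ⟨t, (pvTokens_mem t).mpr (Or.inr ht), hinf⟩ hno
    simp [hg, hp]
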